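-- pv_equiv track=rewrite | github.com/GitsSaikat/PyGen | app.py | parse_generated_content
-- ===== SOURCE A (Python) =====
-- from typing import Dict, Optional, List
--
-- def parse_generated_content(content: str) -> Dict[str, str]:
--     """
--     Parse the generated content into a dictionary of file paths and contents.
--     Expects the format:
--
--     <file_path>
--     <begin_content>
--     file_content here
--     <end_content>
--     """
--     files = {}
--     current_file = None
--     current_content = []
--     state = 'expect_file'
--
--     lines = content.strip().split('\n')
--     line_num = 0
--     while line_num < len(lines):
--         line = lines[line_num]
--         stripped = line.strip()
--         line_num += 1
--
--         if state == 'expect_file':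
--             if stripped.startswith('<') and stripped.endswith('>'):
--                 current_file = stripped[1:-1].strip()
--                 if not current_file:
--                     current_file = None
--                     continue
--                 state = 'expect_begin_content'
--             else:
--                 continue  # Ignore any text before the first <file_path>
--         elif state == 'expect_begin_content':
--             if stripped == '<begin_content>':
--                 current_content = []
--                 state = 'collect_content'
--             else:
--                 current_file = None
--                 state = 'expect_file'
--         elif state == 'collect_content':
--             if stripped == '<end_content>':
--                 if current_file:
--                     files[current_file] = '\n'.join(current_content).strip()
--                 current_file = None
--                 current_content = []
--                 state = 'expect_file'
--             else:
--                 current_content.append(line)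
--     # Handle incomplete file definitions
--     if state == 'collect_content' and current_file:
--         files[current_file] = '\n'.join(current_content).strip()
--     return files
-- ===== SOURCE B (Python) =====
-- def parse_generated_content(content: str) -> dict:
--     """Index-based nested-loop parser: find a <...> header, then either an
--     immediate <begin_content> ... <end_content> block or discard one line."""
--     files = {}
--     lines = content.strip().split('\n')
--     n = len(lines)
--     i = 0
--     while i < n:
--         s = lines[i].strip()
--         i += 1
--         if not (s.startswith('<') and s.endswith('>')):
--             continue
--         path = s[1:-1].strip()
--         if not path:
--             continue
--         if i >= n:
--             break  # header at EOF: block never opened, nothing stored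
--         if lines[i].strip() != '<begin_content>':
--             i += 1  # that line is consumed without being re-examined
--             continue
--         i += 1
--         collected = []
--         while i < n and lines[i].strip() != '<end_content>':
--             collected.append(lines[i])
--             i += 1
--         if i < n:
--             i += 1  # skip '<end_content>'
--         files[path] = '\n'.join(collected).strip()
--     return files
-- ===== Notes on version B (the rewrite author's own statement) =====
-- stated objective: alternative
-- what changed: Replaces A's explicit state-variable machine (state/current_file/current_content threaded through one flat loop) with an index-based nested-loop parser: an outer scan that finds a <...> header, peeks at the next line for <begin_content>, and an inner loop that collects lines until <end_content> or EOF.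
import Mathlib
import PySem

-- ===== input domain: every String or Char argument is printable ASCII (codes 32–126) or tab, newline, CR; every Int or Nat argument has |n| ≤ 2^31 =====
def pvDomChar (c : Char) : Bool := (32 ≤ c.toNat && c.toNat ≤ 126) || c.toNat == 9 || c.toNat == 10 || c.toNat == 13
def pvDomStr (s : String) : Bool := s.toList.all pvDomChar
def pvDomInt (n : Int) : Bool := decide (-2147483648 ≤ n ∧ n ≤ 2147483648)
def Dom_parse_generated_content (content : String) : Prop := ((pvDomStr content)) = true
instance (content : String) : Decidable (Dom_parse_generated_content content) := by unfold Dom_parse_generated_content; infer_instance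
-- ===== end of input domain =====

-- B replaces A's state-variable machine by an index/nested-loop parser (same results; objective: alternative decomposition).

-- ===== PORT A =====
inductive PGState where
  | ef                                       -- 'expect_file'
  | eb (f : String)                          -- 'expect_begin_content' with current_file = f
  | col (f : String) (acc : List String)     -- 'collect_content' with current_file = f, current_content = acc
deriving DecidableEq, Repr

def pgLoopA : List String → PGState → PySem.Dict String String → PySem.Dict String String
  | [], st, files =>
      -- "if state == 'collect_content' and current_file: files[current_file] = ..."
      match st with
      | .col f acc => if f ≠ "" then files.insert f (PySem.Str.strip (PySem.Str.join "\n" acc)) else files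
      | _ => files
  | l :: rest, st, files =>
      match st with
      | .ef =>
          if PySem.Str.startswith (PySem.Str.strip l) "<" && PySem.Str.endswith (PySem.Str.strip l) ">" then
            if PySem.Str.strip (PySem.Str.slice (PySem.Str.strip l) (some 1) (some (-1))) = "" then
              pgLoopA rest .ef files
            else pgLoopA rest (.eb (PySem.Str.strip (PySem.Str.slice (PySem.Str.strip l) (some 1) (some (-1))))) files
          else pgLoopA rest .ef files
      | .eb f =>
          if PySem.Str.strip l = "<begin_content>" then pgLoopA rest (.col f []) files
          else pgLoopA rest .ef files
      | .col f acc =>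
          if PySem.Str.strip l = "<end_content>" then
            pgLoopA rest .ef (if f ≠ "" then files.insert f (PySem.Str.strip (PySem.Str.join "\n" acc)) else files)
          else pgLoopA rest (.col f (acc ++ [l])) files

-- content.strip().split('\n'): the separator is the non-empty literal '\n', so Str.split? is always `some`
def parse_generated_content (content : String) : List (String × String) :=
  (pgLoopA ((PySem.Str.split? (PySem.Str.strip content) "\n").getD []) .ef PySem.Dict.empty).items

-- ===== PORT B =====
-- inner while loop: collect raw lines until '<end_content>' (or EOF); returns (collected, remaining lines)
def pgInnerB : List String → List String → List String × List String
  | [], acc => (acc, [])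
  | l :: rest, acc =>
      if PySem.Str.strip l = "<end_content>" then (acc, rest)
      else pgInnerB rest (acc ++ [l])

theorem pgInnerB_snd_length_le (ls acc : List String) : (pgInnerB ls acc).2.length ≤ ls.length := by
  induction ls generalizing acc with
  | nil => simp [pgInnerB]
  | cons l rest ih =>
      simp only [pgInnerB]
      split
      · simp
      · exact le_trans (ih _) (Nat.le_succ _)

-- outer while loop over the line index, here as recursion on the remaining lines
def pgOuterB : List String → PySem.Dict String String → PySem.Dict String String
  | [], files => files
  | l :: rest, files =>
      if PySem.Str.startswith (PySem.Str.strip l) "<" && PySem.Str.endswith (PySem.Str.strip l) ">" then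
        if PySem.Str.strip (PySem.Str.slice (PySem.Str.strip l) (some 1) (some (-1))) = "" then
          pgOuterB rest files
        else
          match rest with
          | [] => files   -- header at EOF: block never opened
          | r :: rs =>
              if PySem.Str.strip r = "<begin_content>" then
                pgOuterB (pgInnerB rs []).2
                  (files.insert (PySem.Str.strip (PySem.Str.slice (PySem.Str.strip l) (some 1) (some (-1))))
                    (PySem.Str.strip (PySem.Str.join "\n" (pgInnerB rs []).1)))
              else pgOuterB rs files   -- discard that line without re-examining it
      else pgOuterB rest files
  termination_by ls => ls.length
  decreasing_by
    all_goals simp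
    all_goals (have h := pgInnerB_snd_length_le rs []; omega)

def parse_generated_content_alt (content : String) : List (String × String) :=
  (pgOuterB ((PySem.Str.split? (PySem.Str.strip content) "\n").getD []) PySem.Dict.empty).items

-- ===== PRECONDITION & SPEC =====
def Spec_parse_generated_content (content : String) (out : List (String × String)) : Prop := out = parse_generated_content_alt content
instance (content : String) (out : List (String × String)) : Decidable (Spec_parse_generated_content content out) := by unfold Spec_parse_generated_content; infer_instance

-- ===== CLAIM (what is proved, stated in full; the proofs are below) =====
def Claim_equal_parse_generated_content : Prop := ∀ (content : String), Dom_parse_generated_content content → Spec_parse_generated_content content (parse_generated_content content)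

-- ===== LEMMAS AND PROOFS =====

/-- The three states of A's machine, each related to the corresponding point of B's nested loops. -/
theorem pgMain (ls : List String) :
    (∀ files, pgLoopA ls .ef files = pgOuterB ls files) ∧
    (∀ f files, f ≠ "" → pgLoopA ls (.eb f) files =
      match ls with
      | [] => files
      | r :: rs =>
          if PySem.Str.strip r = "<begin_content>" then
            pgOuterB (pgInnerB rs []).2 (files.insert f (PySem.Str.strip (PySem.Str.join "\n" (pgInnerB rs []).1)))
          else pgOuterB rs files) ∧
    (∀ f acc files, f ≠ "" → pgLoopA ls (.col f acc) files =
      pgOuterB (pgInnerB ls acc).2 (files.insert f (PySem.Str.strip (PySem.Str.join "\n" (pgInnerB ls acc).1)))) := by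
  induction ls with
  | nil =>
      refine ⟨fun files => by simp [pgLoopA, pgOuterB], fun f files hf => by simp [pgLoopA],
        fun f acc files hf => ?_⟩
      simp [pgLoopA, pgInnerB, pgOuterB, hf]
  | cons l rest ih =>
      obtain ⟨ihEf, ihEb, ihCol⟩ := ih
      refine ⟨?_, ?_, ?_⟩
      · intro files
        rw [pgOuterB.eq_def]
        simp only [pgLoopA]
        split_ifs with hh hp
        · exact ihEf files
        · exact ihEb _ files hp
        · exact ihEf files
      · intro f files hf
        simp only [pgLoopA]
        split_ifs with hb
        · exact ihCol f [] files hf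
        · exact ihEf files
      · intro f acc files hf
        simp only [pgLoopA, pgInnerB]
        split_ifs with he
        · exact ihEf _
        · exact ihCol f (acc ++ [l]) files hf

-- ===== VERDICT (by name: the statement is the Claim_ definition above) =====
theorem parse_generated_content_spec : Claim_equal_parse_generated_content := by
  intro content _
  unfold Spec_parse_generated_content parse_generated_content parse_generated_content_alt
  rw [(pgMain _).1]
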